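-- pv_equiv track=rewrite | github.com/AndrewNordstrom/NYT_LetterBoxed_Solver | Main.py | word_follows_puzzle_rules
-- ===== SOURCE A (Python) =====
-- def word_follows_puzzle_rules(word, puzzle_faces):
--     used_faces = set()
--     for letter in word:
--         for i, face in enumerate(puzzle_faces):
--             if letter in face:
--                 if i in used_faces:
--                     return False
--                 used_faces.add(i)
--                 break
--     return True
-- ===== SOURCE B (Python) =====
-- def word_follows_puzzle_rules(word, puzzle_faces):
--     first_face = {}
--     for i, face in enumerate(puzzle_faces):
--         for letter in face:
--             if letter not in first_face:
--                 first_face[letter] = i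
--     indices = [first_face[letter] for letter in word if letter in first_face]
--     return len(indices) == len(set(indices))
-- ===== Notes on version B (the rewrite author's own statement) =====
-- stated objective: faster
-- what changed: Replaced the interleaved early-exit scan (per word letter, rescan all faces and maintain a used-set) by a letter-to-first-face index built once over the faces, a lookup pass collecting the face index of each word letter, and a single uniqueness check at the end.
import Mathlib
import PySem

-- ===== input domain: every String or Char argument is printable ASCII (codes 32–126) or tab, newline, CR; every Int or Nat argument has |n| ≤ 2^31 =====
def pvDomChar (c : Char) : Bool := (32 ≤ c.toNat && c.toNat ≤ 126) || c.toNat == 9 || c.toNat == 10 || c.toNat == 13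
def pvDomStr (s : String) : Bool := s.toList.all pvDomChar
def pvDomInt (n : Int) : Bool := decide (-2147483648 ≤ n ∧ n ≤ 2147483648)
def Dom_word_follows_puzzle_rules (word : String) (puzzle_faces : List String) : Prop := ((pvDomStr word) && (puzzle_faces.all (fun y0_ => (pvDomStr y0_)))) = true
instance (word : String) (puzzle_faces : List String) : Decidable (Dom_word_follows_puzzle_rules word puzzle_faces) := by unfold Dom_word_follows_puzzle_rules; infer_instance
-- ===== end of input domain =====

-- B replaces A's interleaved faces-rescan-with-used-set by a one-time letter→first-face
-- index, a lookup pass over the word, and a single uniqueness check at the end (measured faster: no per-letter rescan of the faces).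

-- ===== PORT A =====
-- inner 'for i, face in enumerate(puzzle_faces)' loop: none = the 'return False' path,
-- some used' = fell through or broke with the updated used-set
def pvInnerA (letter : Char) : List (Int × String) → PySem.Set Int → Option (PySem.Set Int)
  | [], used => some used
  | (i, face) :: rest, used =>
    if letter ∈ face.toList then
      if PySem.Set.contains used i then none
      else some (PySem.Set.add used i)
    else pvInnerA letter rest used

-- outer 'for letter in word' loop
def pvLoopA (pairs : List (Int × String)) : List Char → PySem.Set Int → Bool
  | [], _ => true
  | c :: rest, used =>
    match pvInnerA c pairs used with
    | none => false
    | some used' => pvLoopA pairs rest used'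

def word_follows_puzzle_rules (word : String) (puzzle_faces : List String) : Bool :=
  pvLoopA (PySem.List.enumerate puzzle_faces) word.toList PySem.Set.empty

-- ===== PORT B =====
-- 'for letter in face: if letter not in first_face: first_face[letter] = i'
def pvFaceFold (i : Int) (d : PySem.Dict Char Int) (cs : List Char) : PySem.Dict Char Int :=
  cs.foldl (fun d c => if d.contains c then d else d.insert c i) d

-- 'for i, face in enumerate(puzzle_faces): …'
def pvBuild (puzzle_faces : List String) : PySem.Dict Char Int :=
  (PySem.List.enumerate puzzle_faces).foldl (fun d p => pvFaceFold p.1 d p.2.toList) PySem.Dict.empty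

def word_follows_puzzle_rules_alt (word : String) (puzzle_faces : List String) : Bool :=
  let first_face := pvBuild puzzle_faces
  let indices := word.toList.filterMap (fun c => first_face.get? c)
  decide (indices.length = (PySem.Set.ofList indices).length)

-- ===== PRECONDITION & SPEC =====
def Spec_word_follows_puzzle_rules (word : String) (puzzle_faces : List String) (out : Bool) : Prop := out = word_follows_puzzle_rules_alt word puzzle_faces
instance (word : String) (puzzle_faces : List String) (out : Bool) : Decidable (Spec_word_follows_puzzle_rules word puzzle_faces out) := by unfold Spec_word_follows_puzzle_rules; infer_instance

-- ===== CLAIM (what is proved, stated in full; the proofs are below) =====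
def Claim_equal_word_follows_puzzle_rules : Prop := ∀ (word : String) (puzzle_faces : List String), Dom_word_follows_puzzle_rules word puzzle_faces → Spec_word_follows_puzzle_rules word puzzle_faces (word_follows_puzzle_rules word puzzle_faces)

-- ===== LEMMAS AND PROOFS =====

-- first face (index) containing c, the value both programs agree on per letter
def pvFind (c : Char) : List (Int × String) → Option Int
  | [] => none
  | (i, face) :: rest => if c ∈ face.toList then some i else pvFind c rest

theorem pvInnerA_eq (c : Char) (pairs : List (Int × String)) (used : PySem.Set Int) :
    pvInnerA c pairs used =
      match pvFind c pairs with
      | none => some used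
      | some i => if PySem.Set.contains used i then none else some (PySem.Set.add used i) := by
  induction pairs with
  | nil => rfl
  | cons p rest ih =>
    obtain ⟨i, face⟩ := p
    by_cases h : c ∈ face.toList <;> simp [pvInnerA, pvFind, h, ih]

theorem pvFaceFold_get? (i : Int) (cs : List Char) (d : PySem.Dict Char Int) (c : Char) :
    (pvFaceFold i d cs).get? c =
      match d.get? c with
      | some v => some v
      | none => if c ∈ cs then some i else none := by
  induction cs generalizing d with
  | nil => cases h : d.get? c <;> simp [pvFaceFold, h]
  | cons c' t ih =>
    simp only [pvFaceFold, List.foldl_cons]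
    rw [show (List.foldl (fun d c => if d.contains c then d else d.insert c i) _ t) =
        pvFaceFold i (if d.contains c' then d else d.insert c' i) t from rfl, ih]
    by_cases hc : d.contains c' = true
    · cases h : d.get? c with
      | some v => simp [hc, h]
      | none =>
        have hne : c ≠ c' := by
          intro he; subst he
          rw [PySem.Dict.contains_eq_isSome_get?, h] at hc; simp at hc
        simp [hc, h, hne]
    · rw [if_neg (by simp [hc])]
      by_cases he : c = c'
      · subst he
        have : d.get? c = none := by
          rw [PySem.Dict.contains_eq_isSome_get?] at hc
          cases h : d.get? c <;> simp [h] at hc ⊢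
        simp [PySem.Dict.get?_insert_self, this]
      · rw [PySem.Dict.get?_insert (κ := Char)]
        cases h : d.get? c <;> simp [he]

theorem pvBuild_get?_aux (pairs : List (Int × String)) (d : PySem.Dict Char Int) (c : Char) :
    (pairs.foldl (fun d p => pvFaceFold p.1 d p.2.toList) d).get? c =
      match d.get? c with
      | some v => some v
      | none => pvFind c pairs := by
  induction pairs generalizing d with
  | nil => cases h : d.get? c <;> simp [pvFind, h]
  | cons p rest ih =>
    obtain ⟨i, face⟩ := p
    simp only [List.foldl_cons]
    rw [ih, pvFaceFold_get?]
    cases h : d.get? c with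
    | some v => simp
    | none => by_cases hm : c ∈ face.toList <;> simp [pvFind, hm]

theorem pvBuild_get? (puzzle_faces : List String) (c : Char) :
    (pvBuild puzzle_faces).get? c = pvFind c (PySem.List.enumerate puzzle_faces) := by
  rw [pvBuild, pvBuild_get?_aux]
  simp [PySem.Dict.get?_empty]

theorem pvLoopA_eq (pairs : List (Int × String)) (w : List Char) (used : PySem.Set Int) :
    pvLoopA pairs w used =
      decide ((w.filterMap (fun c => pvFind c pairs)).Nodup ∧
              ∀ i ∈ w.filterMap (fun c => pvFind c pairs), i ∉ used) := by
  induction w generalizing used with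
  | nil => simp [pvLoopA]
  | cons c rest ih =>
    rw [pvLoopA, pvInnerA_eq]
    cases hf : pvFind c pairs with
    | none => simp only [List.filterMap_cons, hf]; exact ih used
    | some i =>
      have hfc : List.filterMap (fun c => pvFind c pairs) (c :: rest) =
          i :: List.filterMap (fun c => pvFind c pairs) rest := by
        simp [hf]
      rw [hfc]
      rw [show (match some i with
            | none => some used
            | some i => if used.contains i = true then none else some (used.add i)) =
          if used.contains i = true then none else some (used.add i) from rfl]
      by_cases hu : i ∈ used
      · rw [if_pos ((PySem.Set.contains_iff used i).mpr hu)]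
        change false = _
        symm
        rw [decide_eq_false_iff_not]
        rintro ⟨-, hall⟩
        exact hall i (List.mem_cons_self ..) hu
      · rw [if_neg (by
          intro h
          exact hu ((PySem.Set.contains_iff used i).mp h))]
        change pvLoopA pairs rest (PySem.Set.add used i) = _
        rw [ih]
        rw [decide_eq_decide, List.nodup_cons]
        constructor
        · rintro ⟨hnd, hall⟩
          refine ⟨⟨fun hm => ?_, hnd⟩, fun j hj => ?_⟩
          · exact absurd ((PySem.Set.mem_add used i i).mpr (Or.inr rfl)) (hall i hm)
          · rcases List.mem_cons.mp hj with rfl | hj'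
            · exact hu
            · intro hm
              exact hall j hj' ((PySem.Set.mem_add used i j).mpr (Or.inl hm))
        · rintro ⟨⟨hni, hnd⟩, hall⟩
          refine ⟨hnd, fun j hj hm => ?_⟩
          rcases (PySem.Set.mem_add used i j).mp hm with hm' | rfl
          · exact hall j (List.mem_cons.mpr (Or.inr hj)) hm'
          · exact hni hj

theorem length_ofList_eq_iff_nodup (l : List Int) :
    l.length = (PySem.Set.ofList l).length ↔ l.Nodup := by
  constructor
  · induction l using List.reverseRecOn with
    | nil => intro _; simp
    | append_singleton xs x ih =>
      intro h
      rw [PySem.Set.ofList_append_singleton, PySem.Set.add_eq_ite] at h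
      by_cases hm : x ∈ PySem.Set.ofList xs
      · rw [if_pos hm] at h
        have := PySem.Set.length_ofList_le xs
        simp at h; omega
      · rw [if_neg hm] at h
        simp at h
        have hx : x ∉ xs := fun hx => hm ((PySem.Set.mem_ofList xs x).mpr hx)
        simp only [List.nodup_append, List.nodup_singleton, true_and]
        refine ⟨ih h, fun a ha b hb => ?_⟩
        rw [List.mem_singleton] at hb
        subst hb
        exact fun hab => hx (hab ▸ ha)
  · intro h
    rw [PySem.Set.ofList_eq_self_of_nodup _ h]

-- ===== VERDICT (by name: the statement is the Claim_ definition above) =====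
theorem word_follows_puzzle_rules_spec : Claim_equal_word_follows_puzzle_rules := by
  intro word puzzle_faces _
  unfold Spec_word_follows_puzzle_rules word_follows_puzzle_rules word_follows_puzzle_rules_alt
  rw [pvLoopA_eq]
  have hfm : word.toList.filterMap (fun c => (pvBuild puzzle_faces).get? c) =
      word.toList.filterMap (fun c => pvFind c (PySem.List.enumerate puzzle_faces)) := by
    apply List.filterMap_congr
    intro c _
    exact pvBuild_get? puzzle_faces c
  simp only [hfm]
  rw [decide_eq_decide]
  constructor
  · rintro ⟨h, _⟩; exact (length_ofList_eq_iff_nodup _).mpr h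
  · intro h
    exact ⟨(length_ofList_eq_iff_nodup _).mp h,
      fun i _ hm => by simp [PySem.Set.empty] at hm⟩
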